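-- pv_equiv track=rewrite | github.com/guru-14/CodeChef | December Lunchtime 2019/EVIPRO.py | f
-- ===== SOURCE A (Python) =====
-- def f(s, l, r):
--     u = list(s)
--     for i in range(l, r + 1):
--         if u[i] == '1':
--             u[i] = '0'
--         else:
--             u[i] = '1'
--     c = 0
--     for i in range(len(u) - 1):
--         if u[i] == u[i + 1]:
--             c += 1
--     return c
-- ===== SOURCE B (Python) =====
-- def f(s, l, r):
--     # One pass over adjacent pairs; the flip of [l, r] is applied lazily per pair:
--     # a pair fully inside the range is equal iff the two "is it '1'" bits agree.
--     if l > r: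
--         return sum(a == b for a, b in zip(s, s[1:]))
--     c = 0
--     for i in range(len(s) - 1):
--         a, b = s[i], s[i + 1]
--         ina, inb = l <= i <= r, l <= i + 1 <= r
--         if ina and inb:
--             c += (a == '1') == (b == '1')
--         elif ina:
--             c += b == ('0' if a == '1' else '1')
--         elif inb:
--             c += a == ('0' if b == '1' else '1')
--         else:
--             c += a == b
--     return c
-- ===== Notes on version B (the rewrite author's own statement) =====
-- stated objective: alternative
-- what changed: B never materializes or mutates a flipped copy of the string: it makes a single pass over adjacent pairs, deciding each pair's equality directly from its position relative to [l,r] (a pair fully inside the range compares the two is-'1' bits), instead of A's flip loop over [l,r] followed by a second counting pass over the whole list.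
-- outside the precondition, e.g. on f('01', -1, 0): A returns 0, B returns 1; on f('ab', -1, -1): A returns 0, B returns 0
import Mathlib
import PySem

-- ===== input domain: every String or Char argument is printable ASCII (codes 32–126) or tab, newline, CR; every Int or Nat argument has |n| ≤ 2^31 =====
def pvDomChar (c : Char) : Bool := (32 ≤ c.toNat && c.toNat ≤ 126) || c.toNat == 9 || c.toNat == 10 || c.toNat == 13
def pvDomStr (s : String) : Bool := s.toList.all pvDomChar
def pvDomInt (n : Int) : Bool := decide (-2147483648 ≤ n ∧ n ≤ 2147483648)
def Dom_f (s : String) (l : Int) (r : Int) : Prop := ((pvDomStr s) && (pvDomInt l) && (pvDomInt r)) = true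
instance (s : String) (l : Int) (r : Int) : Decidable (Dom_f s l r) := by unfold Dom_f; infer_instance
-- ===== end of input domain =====

-- B replaces A's flip-then-count two-pass scheme with one pass over adjacent pairs that
-- classifies each pair by its position relative to [l, r] (alternative decomposition, not faster).

-- ===== PORT A =====
def f (s : String) (l : Int) (r : Int) : Int :=
  let u := (PySem.List.pyRange l (r + 1) 1).foldl
    (fun u i =>
      PySem.List.pySetD u i (if PySem.List.pyGetD u i ' ' = '1' then '0' else '1'))
    s.toList
  (PySem.List.pyRange 0 ((u.length : Int) - 1) 1).foldl
    (fun c i =>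
      if PySem.List.pyGetD u i ' ' = PySem.List.pyGetD u (i + 1) ' ' then c + 1 else c)
    0

-- ===== PORT B =====
def f_alt (s : String) (l : Int) (r : Int) : Int :=
  let t := s.toList
  if l > r then
    ((t.zip (t.drop 1)).countP (fun p => p.1 == p.2) : Int)
  else
    (PySem.List.pyRange 0 ((t.length : Int) - 1) 1).foldl
      (fun c i =>
        let a := PySem.List.pyGetD t i ' '
        let b := PySem.List.pyGetD t (i + 1) ' '
        if (l ≤ i ∧ i ≤ r) ∧ (l ≤ i + 1 ∧ i + 1 ≤ r) then
          c + (if (a = '1') = (b = '1') then 1 else 0)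
        else if l ≤ i ∧ i ≤ r then
          c + (if b = (if a = '1' then '0' else '1') then 1 else 0)
        else if l ≤ i + 1 ∧ i + 1 ≤ r then
          c + (if a = (if b = '1' then '0' else '1') then 1 else 0)
        else
          c + (if a = b then 1 else 0))
      0

-- ===== PRECONDITION & SPEC =====
-- Pre_f: the flip loop is empty (r < l) or flips the literal in-range segment [l, r].
-- It excludes l < 0 with l ≤ r (where A still returns if -len ≤ l): there Python's
-- negative-index convention makes A flip a wrapped range counted from the END of the
-- string (possibly twice) — a corner where the wrapped and the literal reading of
-- [l, r] are both defensible; B uses the literal one.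
def Pre_f (s : String) (l : Int) (r : Int) : Prop :=
  r < l ∨ (0 ≤ l ∧ r < (s.toList.length : Int))
instance (s : String) (l : Int) (r : Int) : Decidable (Pre_f s l r) := by
  unfold Pre_f; infer_instance

def pvWitness_f : String × Int × Int := ("0110", 1, 2)

def Spec_f (s : String) (l : Int) (r : Int) (out : Int) : Prop :=
  out = f_alt s l r
instance (s : String) (l : Int) (r : Int) (out : Int) : Decidable (Spec_f s l r out) := by
  unfold Spec_f; infer_instance

-- ===== CLAIM (what is proved, stated in full; the proofs are below) =====
def Claim_equal_f : Prop := ∀ (s : String) (l : Int) (r : Int), Dom_f s l r → Pre_f s l r → Spec_f s l r (f s l r)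

-- ===== LEMMAS AND PROOFS =====

-- The adjacent-equal counting fold equals the zip-based count.
theorem countFold_eq_zip (u : List Char) :
    (PySem.List.pyRange 0 ((u.length : Int) - 1) 1).foldl
      (fun c i =>
        if PySem.List.pyGetD u i ' ' = PySem.List.pyGetD u (i + 1) ' ' then c + 1 else c)
      0
    = ((u.zip (u.drop 1)).countP (fun p => p.1 == p.2) : Int) := by
  have key : ∀ (n : Nat) (acc : Int), n + 1 ≤ u.length →
      (PySem.List.pyRange 0 (n : Int) 1).foldl
        (fun c i =>
          if PySem.List.pyGetD u i ' ' = PySem.List.pyGetD u (i + 1) ' ' then c + 1 else c)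
        acc
      = acc + (((u.zip (u.drop 1)).take n).countP (fun p => p.1 == p.2) : Int) := by
    intro n
    induction n with
    | zero =>
      intro acc _
      simp [PySem.List.pyRange_one_eq_nil]
    | succ n ih =>
      intro acc hlen
      have h0 : (0 : Int) ≤ (n : Int) := by omega
      have hcast : ((n + 1 : Nat) : Int) = (n : Int) + 1 := by push_cast; ring
      rw [hcast, PySem.List.pyRange_one_succ_right h0, List.foldl_append,
        ih acc (by omega)]
      have hn1 : n + 1 < u.length := by omega
      have hn : n < u.length := by omega
      have hzlen : n < (u.zip (u.drop 1)).length := by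
        simp [List.length_zip]; omega
      have hget1 : PySem.List.pyGetD u (n : Int) ' ' = u[n] := by
        rw [PySem.List.pyGetD_natCast]; exact List.getD_eq_getElem u ' ' hn
      have hget2 : PySem.List.pyGetD u ((n : Int) + 1) ' ' = u[n + 1] := by
        rw [← hcast, PySem.List.pyGetD_natCast]; exact List.getD_eq_getElem u ' ' hn1
      have hpair : (u.zip (u.drop 1))[n] = (u[n], u[n + 1]) := by
        rw [List.getElem_zip]
        congr 1
        rw [List.getElem_drop]
        congr 1
        omega
      have htake : ((u.zip (u.drop 1)).take (n + 1))
          = (u.zip (u.drop 1)).take n ++ [(u[n], u[n + 1])] := by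
        rw [List.take_add_one, List.getElem?_eq_getElem hzlen, hpair]
        rfl
      rw [htake, List.foldl, hget1, hget2, List.countP_append]
      by_cases h : u[n] = u[n + 1]
      · simp [h]
        ring
      · simp [h]
  rcases Nat.eq_zero_or_pos u.length with h0 | hpos
  · rw [List.length_eq_zero_iff] at h0
    subst h0
    simp [PySem.List.pyRange_one_eq_nil]
  · have hc : ((u.length : Int) - 1) = ((u.length - 1 : Nat) : Int) := by omega
    have hz : (u.zip (u.drop 1)).length = u.length - 1 := by
      simp [List.length_zip]
    rw [hc, key (u.length - 1) 0 (by omega), List.take_of_length_le (by omega), zero_add]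

-- Characterization of A's flip loop (nonnegative l): pointwise description of the result.
theorem flipFold_char (t : List Char) (l : Int) (hl : 0 ≤ l) :
    ∀ (k : Nat), l + k ≤ (t.length : Int) →
      ((PySem.List.pyRange l (l + k) 1).foldl
        (fun u i =>
          PySem.List.pySetD u i (if PySem.List.pyGetD u i ' ' = '1' then '0' else '1'))
        t).length = t.length
      ∧ ∀ (j : Nat), j < t.length →
          PySem.List.pyGetD
            ((PySem.List.pyRange l (l + k) 1).foldl
              (fun u i =>
                PySem.List.pySetD u i
                  (if PySem.List.pyGetD u i ' ' = '1' then '0' else '1'))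
              t) (j : Int) ' '
          = (if l ≤ (j : Int) ∧ (j : Int) < l + k then
              (if PySem.List.pyGetD t (j : Int) ' ' = '1' then '0' else '1')
             else PySem.List.pyGetD t (j : Int) ' ') := by
  intro k
  induction k with
  | zero =>
    intro _
    have h0 : l + ((0 : Nat) : Int) = l := by push_cast; ring
    rw [h0, PySem.List.pyRange_one_eq_nil (le_refl l)]
    refine ⟨rfl, ?_⟩
    intro j hj
    simp only [List.foldl_nil]
    have : ¬ (l ≤ (j : Int) ∧ (j : Int) < l) := by omega
    rw [if_neg this]
  | succ k ih =>
    intro hk1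
    have hcast : l + ((k + 1 : Nat) : Int) = (l + (k : Nat)) + 1 := by push_cast; ring
    have hk : l + (k : Nat) ≤ (t.length : Int) := by omega
    obtain ⟨hlen, hchar⟩ := ih hk
    have hsplit : PySem.List.pyRange l (l + ((k + 1 : Nat) : Int)) 1
        = PySem.List.pyRange l (l + ((k : Nat) : Int)) 1 ++ [l + (k : Nat)] := by
      rw [hcast]
      exact PySem.List.pyRange_one_succ_right (by omega)
    rw [hsplit, List.foldl_append]
    set w := (PySem.List.pyRange l (l + ((k : Nat) : Int)) 1).foldl
      (fun u i =>
        PySem.List.pySetD u i (if PySem.List.pyGetD u i ' ' = '1' then '0' else '1')) t with hw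
    have hj0 : (l + (k : Nat)).toNat < w.length := by rw [hlen]; omega
    have hi0 : l + ((k : Nat) : Int) = (((l + (k : Nat)).toNat : Nat) : Int) := by omega
    simp only [List.foldl_cons, List.foldl_nil]
    have hwold : PySem.List.pyGetD w (l + ((k : Nat) : Int)) ' '
        = PySem.List.pyGetD t (l + ((k : Nat) : Int)) ' ' := by
      rw [hi0, hchar (l + (k : Nat)).toNat (by omega)]
      rw [if_neg (by omega)]
    constructor
    · rw [PySem.List.length_pySetD, hlen]
    · intro j hj
      rw [hi0, PySem.List.pyGetD_pySetD_natCast w (l + (k : Nat)).toNat j _ ' ' hj0]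
      by_cases hje : j = (l + (k : Nat)).toNat
      · subst hje
        rw [if_pos rfl, ← hi0, hwold,
          if_pos (show l ≤ l + ((k : Nat) : Int) ∧ l + ((k : Nat) : Int) < l + (((k + 1 : Nat)) : Int) by omega)]
      · rw [if_neg hje, hchar j hj]
        by_cases hin : l ≤ (j : Int) ∧ (j : Int) < l + (k : Nat)
        · rw [if_pos hin,
            if_pos (show l ≤ (j : Int) ∧ (j : Int) < l + (((k + 1 : Nat)) : Int) by omega)]
        · rw [if_neg hin,
            if_neg (show ¬ (l ≤ (j : Int) ∧ (j : Int) < l + (((k + 1 : Nat)) : Int)) by omega)]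

theorem ite_count (P : Prop) [Decidable P] (acc : Int) :
    (if P then acc + 1 else acc) = acc + (if P then 1 else 0) := by
  split_ifs <;> ring

theorem flip_eq_flip (a b : Char) :
    ((if a = '1' then '0' else '1') = (if b = '1' then '0' else '1')) ↔ ((a = '1') = (b = '1')) := by
  by_cases ha : a = '1' <;> by_cases hb : b = '1' <;> simp [ha, hb]

-- ===== VERDICT (by name: the statement is the Claim_ definition above) =====
theorem f_spec : Claim_equal_f := by
  intro s l r _ hpre
  show f s l r = f_alt s l r
  unfold f f_alt
  by_cases hlr : r < l
  · rw [PySem.List.pyRange_one_eq_nil (show r + 1 ≤ l by omega), if_pos (show l > r from hlr)]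
    simp only [List.foldl_nil]
    exact countFold_eq_zip s.toList
  · have hpre' : 0 ≤ l ∧ r < (s.toList.length : Int) := by
      unfold Pre_f at hpre
      rcases hpre with h | h
      · omega
      · exact h
    have hl : 0 ≤ l := hpre'.1
    have hr : r < (s.toList.length : Int) := hpre'.2
    rw [if_neg (show ¬ l > r by omega)]
    set t := s.toList with ht
    set k := (r + 1 - l).toNat with hkdef
    have hk' : l + (k : Int) = r + 1 := by omega
    have hrange : PySem.List.pyRange l (r + 1) 1 = PySem.List.pyRange l (l + (k : Nat)) 1 := by
      rw [hk']
    rw [hrange]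
    obtain ⟨hlen, hchar⟩ := flipFold_char t l hl k (by omega)
    simp only [hlen]
    apply PySem.List.foldl_congr_mem
    intro acc i hi
    obtain ⟨h0i, hilt⟩ := (PySem.List.mem_pyRange_one).mp hi
    have hij : ((i.toNat : Nat) : Int) = i := Int.toNat_of_nonneg h0i
    rw [← hij]
    set j := i.toNat with hj
    have hjlt : j < t.length := by omega
    have hjlt1 : j + 1 < t.length := by omega
    have hc2 : ((j : Nat) : Int) + 1 = ((j + 1 : Nat) : Int) := by push_cast; ring
    rw [hc2, hchar j hjlt, hchar (j + 1) hjlt1]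
    by_cases hina : l ≤ ((j : Nat) : Int) ∧ ((j : Nat) : Int) ≤ r <;>
      by_cases hinb : l ≤ ((j + 1 : Nat) : Int) ∧ ((j + 1 : Nat) : Int) ≤ r
    · rw [if_pos (show l ≤ ((j : Nat) : Int) ∧ ((j : Nat) : Int) < l + (k : Nat) by omega),
        if_pos (show l ≤ ((j + 1 : Nat) : Int) ∧ ((j + 1 : Nat) : Int) < l + (k : Nat) by omega),
        ite_count,
        if_congr (flip_eq_flip (PySem.List.pyGetD t ((j : Nat) : Int) ' ')
          (PySem.List.pyGetD t ((j + 1 : Nat) : Int) ' ')) rfl rfl,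
        if_pos (show (l ≤ ((j : Nat) : Int) ∧ ((j : Nat) : Int) ≤ r) ∧
          (l ≤ ((j + 1 : Nat) : Int) ∧ ((j + 1 : Nat) : Int) ≤ r) from ⟨hina, hinb⟩)]
    · rw [if_pos (show l ≤ ((j : Nat) : Int) ∧ ((j : Nat) : Int) < l + (k : Nat) by omega),
        if_neg (show ¬ (l ≤ ((j + 1 : Nat) : Int) ∧ ((j + 1 : Nat) : Int) < l + (k : Nat)) by omega),
        ite_count, if_congr (eq_comm) rfl rfl,
        if_neg (show ¬ ((l ≤ ((j : Nat) : Int) ∧ ((j : Nat) : Int) ≤ r) ∧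
          (l ≤ ((j + 1 : Nat) : Int) ∧ ((j + 1 : Nat) : Int) ≤ r)) by tauto),
        if_pos hina]
    · rw [if_neg (show ¬ (l ≤ ((j : Nat) : Int) ∧ ((j : Nat) : Int) < l + (k : Nat)) by omega),
        if_pos (show l ≤ ((j + 1 : Nat) : Int) ∧ ((j + 1 : Nat) : Int) < l + (k : Nat) by omega),
        ite_count,
        if_neg (show ¬ ((l ≤ ((j : Nat) : Int) ∧ ((j : Nat) : Int) ≤ r) ∧
          (l ≤ ((j + 1 : Nat) : Int) ∧ ((j + 1 : Nat) : Int) ≤ r)) by tauto),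
        if_neg hina, if_pos hinb]
    · rw [if_neg (show ¬ (l ≤ ((j : Nat) : Int) ∧ ((j : Nat) : Int) < l + (k : Nat)) by omega),
        if_neg (show ¬ (l ≤ ((j + 1 : Nat) : Int) ∧ ((j + 1 : Nat) : Int) < l + (k : Nat)) by omega),
        ite_count,
        if_neg (show ¬ ((l ≤ ((j : Nat) : Int) ∧ ((j : Nat) : Int) ≤ r) ∧
          (l ≤ ((j + 1 : Nat) : Int) ∧ ((j + 1 : Nat) : Int) ≤ r)) by tauto),
        if_neg hina, if_neg hinb]
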